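-- pv_equiv track=rewrite | github.com/aquamatt/Peloton | src/peloton/utils/json.py | _tr_string
-- ===== SOURCE A (Python) =====
-- def _tr_string(o):
--     substitutions = [('\\', r'\\'),
--                      ('"', r'\"'),
--                      ('\r', r'\r'),
--                      ('\n', r'\n'),
--                      ('\t', r'\t'),
--                      ('\f', r'\f'),
--                      ('\b', r'\b'),
--                      ]
--     for s, r in substitutions:
--         o = o.replace(s, r)
--     return u'"%s"' % o
-- ===== SOURCE B (Python) =====
-- def _tr_string(o):
--     sub = {'\\': '\\\\', '"': '\\"', '\r': '\\r', '\n': '\\n',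
--            '\t': '\\t', '\f': '\\f', '\b': '\\b'}
--     out = []
--     for c in o:
--         out.append(sub.get(c, c))
--     return '"%s"' % ''.join(out)
-- ===== Notes on version B (the rewrite author's own statement) =====
-- stated objective: alternative
-- what changed: Replaces seven sequential full-string .replace() scans with one single pass over the characters using a prebuilt escape dict, joining the pieces at the end.
import Mathlib
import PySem

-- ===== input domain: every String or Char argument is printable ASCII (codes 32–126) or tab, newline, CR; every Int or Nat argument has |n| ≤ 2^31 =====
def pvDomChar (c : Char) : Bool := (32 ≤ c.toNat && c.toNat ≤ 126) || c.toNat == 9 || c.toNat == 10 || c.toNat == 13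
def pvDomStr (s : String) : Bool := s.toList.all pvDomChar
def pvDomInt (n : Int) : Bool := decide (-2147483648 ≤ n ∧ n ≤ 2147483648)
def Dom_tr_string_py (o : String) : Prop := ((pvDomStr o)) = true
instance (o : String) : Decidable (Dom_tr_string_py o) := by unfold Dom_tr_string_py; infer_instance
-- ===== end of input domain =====

-- B makes a single pass over the characters with a prebuilt escape table instead of
-- A's seven sequential whole-string replace scans (objective: alternative, same cost class).

-- ===== PORT A =====
-- the literal substitution list of A, in order
def trSubstitutions : List (String × String) :=
  [("\\", "\\\\"), ("\"", "\\\""), ("\r", "\\r"), ("\n", "\\n"),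
   ("\t", "\\t"), ("\x0c", "\\f"), ("\x08", "\\b")]

-- '"%s"' % o, built over the char list (Lean's String.append is opaque to the kernel)
def tr_string_py (o : String) : String :=
  let o := trSubstitutions.foldl (fun o sr => PySem.Str.replace o sr.1 sr.2) o
  String.mk ('"' :: o.toList ++ ['"'])

-- ===== PORT B =====
-- the dict 'sub' of Source B (values kept as char lists)
def trEscMap : PySem.Dict Char (List Char) :=
  PySem.Dict.mk [('\\', ['\\', '\\']), ('"', ['\\', '"']), ('\r', ['\\', 'r']),
                 ('\n', ['\\', 'n']), ('\t', ['\\', 't']), ('\x0c', ['\\', 'f']),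
                 ('\x08', ['\\', 'b'])]

-- the loop appending sub.get(c, c) for each c, then ''.join, then '"%s"' %
def tr_string_py_alt (o : String) : String :=
  let out := o.toList.map (fun c => trEscMap.getD c [c])
  String.mk ('"' :: PySem.Chars.join [] out ++ ['"'])

-- ===== PRECONDITION & SPEC =====
def Spec_tr_string_py (o : String) (out : String) : Prop := out = tr_string_py_alt o
instance (o : String) (out : String) : Decidable (Spec_tr_string_py o out) := by unfold Spec_tr_string_py; infer_instance

-- ===== CLAIM (what is proved, stated in full; the proofs are below) =====
def Claim_equal_tr_string_py : Prop := ∀ (o : String), Dom_tr_string_py o → Spec_tr_string_py o (tr_string_py o)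

-- ===== LEMMAS AND PROOFS =====

-- single-char-pattern replace is a character-wise flatMap
theorem charReplace_go_single (s : Char) (new : List Char) :
    ∀ (l : List Char) (fuel : Nat) (acc : List Char), l.length ≤ fuel →
      PySem.Chars.replace.go [s] new fuel l acc
        = acc.reverse ++ l.flatMap (fun c => if c = s then new else [c]) := by
  intro l
  induction l with
  | nil =>
    intro fuel acc _
    cases fuel <;> simp [PySem.Chars.replace.go]
  | cons c t ih =>
    intro fuel acc h
    cases fuel with
    | zero => simp at h
    | succ n =>
      have hn : t.length ≤ n := by simpa using h
      by_cases hc : c = s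
      · subst hc
        have hpre : [c].isPrefixOf (c :: t) = true := by simp [List.isPrefixOf]
        simp only [PySem.Chars.replace.go, hpre]
        rw [show List.drop [c].length (c :: t) = t from rfl, ih n (new.reverse ++ acc) hn]
        simp
      · have hpre : [s].isPrefixOf (c :: t) = false := by
          simp only [List.isPrefixOf, Bool.and_eq_false_iff, beq_eq_false_iff_ne]
          exact Or.inl fun h' => hc h'.symm
        simp only [PySem.Chars.replace.go, hpre, Bool.false_eq_true, if_false]
        rw [ih n (c :: acc) hn]
        simp [hc]

theorem charReplace_single (s : Char) (new cs : List Char) :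
    PySem.Chars.replace cs [s] new = cs.flatMap (fun c => if c = s then new else [c]) := by
  simp only [PySem.Chars.replace]
  rw [if_neg (by simp)]
  simpa using charReplace_go_single s new cs cs.length [] le_rfl

theorem flatMap_comp {α : Type} (l : List α) (f g : α → List α) :
    (l.flatMap f).flatMap g = l.flatMap (fun a => (f a).flatMap g) := by
  induction l with
  | nil => rfl
  | cons a t ih => simp [List.flatMap_cons, ih]

theorem join_nil_flatMap (parts : Char → List Char) (l : List Char) :
    PySem.Chars.join [] (l.map parts) = l.flatMap parts := by
  induction l with
  | nil => simp [PySem.Chars.join_nil]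
  | cons a t ih =>
    cases t with
    | nil => simp [PySem.Chars.join, List.intercalate]
    | cons b r =>
      simp only [List.map_cons] at ih ⊢
      rw [PySem.Chars.join_cons_cons, ih]
      simp

-- the seven composed per-character substitutions equal B's table lookup, for every char
theorem pointwise_eq (c : Char) :
    List.flatMap (fun a => List.flatMap (fun a => List.flatMap (fun a =>
      List.flatMap (fun a => List.flatMap (fun a =>
        List.flatMap (fun c => if c = '\x08' then ['\\','b'] else [c])
          (if a = '\x0c' then ['\\','f'] else [a]))
        (if a = '\t' then ['\\','t'] else [a]))
        (if a = '\n' then ['\\','n'] else [a]))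
        (if a = '\r' then ['\\','r'] else [a]))
        (if a = '"' then ['\\','"'] else [a]))
      (if c = '\\' then ['\\','\\'] else [c])
      = trEscMap.getD c [c] := by
  by_cases h1 : c = '\\'
  · subst h1; decide
  by_cases h2 : c = '"'
  · subst h2; decide
  by_cases h3 : c = '\r'
  · subst h3; decide
  by_cases h4 : c = '\n'
  · subst h4; decide
  by_cases h5 : c = '\t'
  · subst h5; decide
  by_cases h6 : c = '\x0c'
  · subst h6; decide
  by_cases h7 : c = '\x08'
  · subst h7; decide
  · have e1 : ('\\' == c) = false := by simp [Ne.symm h1]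
    have e2 : ('"' == c) = false := by simp [Ne.symm h2]
    have e3 : ('\r' == c) = false := by simp [Ne.symm h3]
    have e4 : ('\n' == c) = false := by simp [Ne.symm h4]
    have e5 : ('\t' == c) = false := by simp [Ne.symm h5]
    have e6 : ('\x0c' == c) = false := by simp [Ne.symm h6]
    have e7 : ('\x08' == c) = false := by simp [Ne.symm h7]
    simp [h1, h2, h3, h4, h5, h6, h7, trEscMap, PySem.Dict.getD, PySem.Dict.get?,
      List.find?, e1, e2, e3, e4, e5, e6, e7]

-- A's seven-replace chain over a char list equals B's per-character table lookup
theorem chain_eq (cs : List Char) :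
    PySem.Chars.replace (PySem.Chars.replace (PySem.Chars.replace (PySem.Chars.replace
      (PySem.Chars.replace (PySem.Chars.replace (PySem.Chars.replace cs
        ['\\'] ['\\','\\']) ['"'] ['\\','"']) ['\r'] ['\\','r']) ['\n'] ['\\','n'])
        ['\t'] ['\\','t']) ['\x0c'] ['\\','f']) ['\x08'] ['\\','b']
      = cs.flatMap (fun c => trEscMap.getD c [c]) := by
  simp only [charReplace_single, flatMap_comp]
  congr 1
  funext c
  exact pointwise_eq c

-- ===== VERDICT (by name: the statement is the Claim_ definition above) =====
theorem tr_string_py_spec : Claim_equal_tr_string_py := by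
  intro o _
  unfold Spec_tr_string_py tr_string_py tr_string_py_alt trSubstitutions
  simp only [List.foldl_cons, List.foldl_nil, PySem.Str.toList_replace]
  rw [join_nil_flatMap]
  rw [show ("\\" : String).toList = ['\\'] from by decide,
      show ("\\\\" : String).toList = ['\\','\\'] from by decide,
      show ("\"" : String).toList = ['"'] from by decide,
      show ("\\\"" : String).toList = ['\\','"'] from by decide,
      show ("\r" : String).toList = ['\r'] from by decide,
      show ("\\r" : String).toList = ['\\','r'] from by decide,
      show ("\n" : String).toList = ['\n'] from by decide,
      show ("\\n" : String).toList = ['\\','n'] from by decide,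
      show ("\t" : String).toList = ['\t'] from by decide,
      show ("\\t" : String).toList = ['\\','t'] from by decide,
      show ("\x0c" : String).toList = ['\x0c'] from by decide,
      show ("\\f" : String).toList = ['\\','f'] from by decide,
      show ("\x08" : String).toList = ['\x08'] from by decide,
      show ("\\b" : String).toList = ['\\','b'] from by decide,
      chain_eq]
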